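-- pv_equiv track=rewrite | github.com/Amitkumawat01/Live-PNR-status-on-email | MainApp/utils.py | solve_captcha
-- ===== SOURCE A (Python) =====
-- def solve_captcha(text):
--     plus = 0
--     dig1 = 0
--     dig = 0
--
--     for i in text:
--         if i=='=' or i=='?':
--             break
--         elif i == '+' or i == '-':
--             if i == '+':
--                 plus = 1
--             dig1 = dig
--             dig = 0
--         elif '0'<=i and i<='9':
--             dig = dig * 10 + int(i)
--         else:
--             continue
--
--     if plus:
--         dig1 += dig
--     else:
--         dig1 -= dig
--     return dig1
-- ===== SOURCE B (Python) =====
-- def solve_captcha(text):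
--     # cut at the first '=' or '?', keep only digits and operators
--     head = text.replace('?', '=').split('=', 1)[0]
--     s = ''.join(c for c in head if c in '0123456789+-')
--     parts = s.replace('+', '-').split('-')
--     dig = int(parts[-1]) if parts[-1] else 0
--     dig1 = (int(parts[-2]) if parts[-2] else 0) if len(parts) > 1 else 0
--     return dig1 + dig if '+' in s else dig1 - dig
-- ===== Notes on version B (the rewrite author's own statement) =====
-- stated objective: simpler
-- what changed: Replaces A's single stateful character loop (break flag, running digit accumulator, shifted registers) by a declarative pipeline: cut the text at the first terminator, filter to digits and operators, split on operators, and combine the last two numeric segments.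
import Mathlib
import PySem

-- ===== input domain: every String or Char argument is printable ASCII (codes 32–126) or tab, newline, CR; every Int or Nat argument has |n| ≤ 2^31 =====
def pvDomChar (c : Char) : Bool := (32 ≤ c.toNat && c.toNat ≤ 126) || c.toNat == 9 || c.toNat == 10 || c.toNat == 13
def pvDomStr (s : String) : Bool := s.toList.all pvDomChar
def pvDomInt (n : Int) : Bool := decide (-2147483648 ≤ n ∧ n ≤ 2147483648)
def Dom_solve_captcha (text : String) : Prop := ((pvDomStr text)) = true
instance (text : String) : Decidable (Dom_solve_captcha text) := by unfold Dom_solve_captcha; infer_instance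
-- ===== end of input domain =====

-- B recomputes A's answer as a split-on-operators pipeline instead of a stateful character loop (simpler decomposition, same cost).

-- ===== PORT A =====
-- the for-loop of A, with its (plus, dig1, dig) state; break = stop returning the state
def solveA_loop : List Char → Int → Int → Int → Int × Int × Int
  | [], plus, dig1, dig => (plus, dig1, dig)
  | c :: cs, plus, dig1, dig =>
    if c = '=' ∨ c = '?' then (plus, dig1, dig)
    else if c = '+' ∨ c = '-' then
      solveA_loop cs (if c = '+' then 1 else plus) dig 0
    else if '0' ≤ c ∧ c ≤ '9' then
      solveA_loop cs plus dig1 (dig * 10 + ((c.toNat : Int) - 48))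
    else
      solveA_loop cs plus dig1 dig

def solve_captcha (text : String) : Int :=
  let r := solveA_loop text.toList 0 0 0
  if r.1 ≠ 0 then r.2.1 + r.2.2 else r.2.1 - r.2.2

-- ===== PORT B =====
-- hand port of str.split('-') on a char list (exact: keeps empty segments, as Python does);
-- the guaranteed-nonempty result is returned as (first segment, remaining segments)
def pySplitDash : List Char → List Char × List (List Char)
  | [] => ([], [])
  | c :: cs =>
    let r := pySplitDash cs
    if c = '-' then ([], r.1 :: r.2) else (c :: r.1, r.2)

-- hand port of int(seg) (exact for the nonempty all-digit segments B applies it to); init generalises for the proofs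
def segVal (init : Int) (seg : List Char) : Int :=
  seg.foldl (fun a c => a * 10 + ((c.toNat : Int) - 48)) init

def solve_captcha_alt (text : String) : Int :=
  -- head = text.replace('?','=').split('=',1)[0]
  let head := (text.toList.map (fun c => if c = '?' then '=' else c)).takeWhile
    (fun c => decide (c ≠ '='))
  -- s = ''.join(c for c in head if c in '0123456789+-')
  let s := head.filter (fun c => "0123456789+-".toList.contains c)
  -- parts = s.replace('+','-').split('-')   (nonempty: r.1 :: r.2)
  let r := pySplitDash (s.map (fun c => if c = '+' then '-' else c))
  let parts := r.1 :: r.2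
  -- dig = int(parts[-1]) if parts[-1] else 0
  let lastSeg := parts.getLastD []
  let dig := if lastSeg.isEmpty then 0 else segVal 0 lastSeg
  -- dig1 = (int(parts[-2]) if parts[-2] else 0) if len(parts) > 1 else 0
  let dig1 := if parts.length > 1 then
      (if (parts.dropLast.getLastD []).isEmpty then 0 else segVal 0 (parts.dropLast.getLastD []))
    else 0
  if '+' ∈ s then dig1 + dig else dig1 - dig

-- ===== PRECONDITION & SPEC =====
def Spec_solve_captcha (text : String) (out : Int) : Prop := out = solve_captcha_alt text
instance (text : String) (out : Int) : Decidable (Spec_solve_captcha text out) := by unfold Spec_solve_captcha; infer_instance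

-- ===== CLAIM (what is proved, stated in full; the proofs are below) =====
def Claim_equal_solve_captcha : Prop := ∀ (text : String), Dom_solve_captcha text → Spec_solve_captcha text (solve_captcha text)

-- ===== LEMMAS AND PROOFS =====

-- (a, b, xs) viewed as a list a :: b :: xs, return its (second-to-last, last)
def last2 (a b : Int) : List Int → Int × Int
  | [] => (a, b)
  | x :: xs => last2 b x xs

-- B's pipeline applied to the already filtered operator/digit list F, generalised over A's loop state
def specFun (F : List Char) (plus dig1 dig : Int) : Int × Int × Int :=
  let r := pySplitDash (F.map (fun c => if c = '+' then '-' else c))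
  ((if '+' ∈ F then 1 else plus), last2 dig1 (segVal dig r.1) (r.2.map (segVal 0)))

lemma specFun_plus (F : List Char) (plus dig1 dig : Int) :
    specFun ('+' :: F) plus dig1 dig = specFun F 1 dig 0 := by
  unfold specFun
  rw [if_pos (List.mem_cons_self), ite_self]
  rfl

lemma specFun_minus (F : List Char) (plus dig1 dig : Int) :
    specFun ('-' :: F) plus dig1 dig = specFun F plus dig 0 := by
  unfold specFun
  rw [if_congr (show ('+' ∈ '-' :: F) ↔ '+' ∈ F by simp) rfl rfl]
  rfl

lemma specFun_digit (c : Char) (F : List Char) (plus dig1 dig : Int)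
    (h1 : c ≠ '+') (h2 : c ≠ '-') :
    specFun (c :: F) plus dig1 dig = specFun F plus dig1 (dig * 10 + ((c.toNat : Int) - 48)) := by
  unfold specFun
  rw [if_congr (show ('+' ∈ c :: F) ↔ '+' ∈ F by simp [List.mem_cons, Ne.symm h1]) rfl rfl]
  simp only [List.map_cons, if_neg h1, pySplitDash]
  rw [if_neg h2]
  rfl

lemma digit_mem (c : Char) (hd : '0' ≤ c ∧ c ≤ '9') :
    ("0123456789+-".toList.contains c) = true := by
  obtain ⟨h1, h2⟩ := hd
  have hv1 : 48 ≤ c.toNat := h1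
  have hv2 : c.toNat ≤ 57 := h2
  have hc : Char.ofNat c.toNat = c := Char.ofNat_toNat c
  rw [← hc]
  have hcase : c.toNat = 48 ∨ c.toNat = 49 ∨ c.toNat = 50 ∨ c.toNat = 51 ∨ c.toNat = 52 ∨
      c.toNat = 53 ∨ c.toNat = 54 ∨ c.toNat = 55 ∨ c.toNat = 56 ∨ c.toNat = 57 := by omega
  rcases hcase with h | h | h | h | h | h | h | h | h | h <;> rw [h] <;> decide

lemma nondigit_not_mem (c : Char) (h1 : c ≠ '+') (h2 : c ≠ '-')
    (hd : ¬ ('0' ≤ c ∧ c ≤ '9')) :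
    ("0123456789+-".toList.contains c) = false := by
  have e0 : c ≠ '0' := fun h => hd (by subst h; exact ⟨by decide, by decide⟩)
  have e1 : c ≠ '1' := fun h => hd (by subst h; exact ⟨by decide, by decide⟩)
  have e2 : c ≠ '2' := fun h => hd (by subst h; exact ⟨by decide, by decide⟩)
  have e3 : c ≠ '3' := fun h => hd (by subst h; exact ⟨by decide, by decide⟩)
  have e4 : c ≠ '4' := fun h => hd (by subst h; exact ⟨by decide, by decide⟩)
  have e5 : c ≠ '5' := fun h => hd (by subst h; exact ⟨by decide, by decide⟩)
  have e6 : c ≠ '6' := fun h => hd (by subst h; exact ⟨by decide, by decide⟩)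
  have e7 : c ≠ '7' := fun h => hd (by subst h; exact ⟨by decide, by decide⟩)
  have e8 : c ≠ '8' := fun h => hd (by subst h; exact ⟨by decide, by decide⟩)
  have e9 : c ≠ '9' := fun h => hd (by subst h; exact ⟨by decide, by decide⟩)
  simp [List.contains_eq_mem, List.mem_cons, e0, e1, e2, e3, e4, e5, e6, e7, e8, e9, h1, h2]

lemma loopA_spec : ∀ (cs : List Char) (plus dig1 dig : Int),
    solveA_loop cs plus dig1 dig
      = specFun ((cs.takeWhile (fun c => decide (c ≠ '=' ∧ c ≠ '?'))).filter
                  (fun c => "0123456789+-".toList.contains c)) plus dig1 dig := by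
  intro cs
  induction cs with
  | nil => intro plus dig1 dig; rfl
  | cons c cs ih =>
    intro plus dig1 dig
    by_cases hb : c = '=' ∨ c = '?'
    · have ht : List.takeWhile (fun c => decide (c ≠ '=' ∧ c ≠ '?')) (c :: cs) = [] := by
        rcases hb with h | h <;> subst h <;> rfl
      rw [ht]
      have hstop : solveA_loop (c :: cs) plus dig1 dig = (plus, dig1, dig) := by
        simp only [solveA_loop, if_pos hb]
      rw [hstop]
      rfl
    · push_neg at hb
      have hbneg : ¬ (c = '=' ∨ c = '?') := by simp [hb.1, hb.2]
      have ht : List.takeWhile (fun c => decide (c ≠ '=' ∧ c ≠ '?')) (c :: cs)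
          = c :: List.takeWhile (fun c => decide (c ≠ '=' ∧ c ≠ '?')) cs := by
        rw [List.takeWhile_cons_of_pos]; simp [hb.1, hb.2]
      rw [ht]
      by_cases hplus : c = '+'
      · subst hplus
        rw [List.filter_cons_of_pos (by decide)]
        have step : solveA_loop ('+' :: cs) plus dig1 dig = solveA_loop cs 1 dig 0 := rfl
        rw [step, ih, specFun_plus]
      · by_cases hminus : c = '-'
        · subst hminus
          rw [List.filter_cons_of_pos (by decide)]
          have step : solveA_loop ('-' :: cs) plus dig1 dig = solveA_loop cs plus dig 0 := rfl
          rw [step, ih, specFun_minus]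
        · have hopneg : ¬ (c = '+' ∨ c = '-') := by simp [hplus, hminus]
          by_cases hd : '0' ≤ c ∧ c ≤ '9'
          · rw [List.filter_cons_of_pos (digit_mem c hd)]
            have step : solveA_loop (c :: cs) plus dig1 dig
                = solveA_loop cs plus dig1 (dig * 10 + ((c.toNat : Int) - 48)) := by
              simp only [solveA_loop, if_neg hbneg, if_neg hopneg, if_pos hd]
            rw [step, ih, specFun_digit c _ plus dig1 dig hplus hminus]
          · rw [List.filter_cons_of_neg (by rw [nondigit_not_mem c hplus hminus hd]; simp)]
            have step : solveA_loop (c :: cs) plus dig1 dig = solveA_loop cs plus dig1 dig := by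
              simp only [solveA_loop, if_neg hbneg, if_neg hopneg, if_neg hd]
            rw [step, ih]

lemma head_eq (cs : List Char) :
    (cs.map (fun c => if c = '?' then '=' else c)).takeWhile (fun c => decide (c ≠ '='))
      = cs.takeWhile (fun c => decide (c ≠ '=' ∧ c ≠ '?')) := by
  induction cs with
  | nil => rfl
  | cons c cs ih =>
    by_cases h1 : c = '?'
    · subst h1; simp [List.takeWhile]
    · by_cases h2 : c = '='
      · subst h2; simp [List.takeWhile]
      · have hc : (if c = '?' then '=' else c) = c := if_neg h1
        simp only [List.map_cons, hc, List.takeWhile_cons]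
        simp only [ne_eq, decide_not] at ih ⊢
        simp [h1, h2, ih]

lemma last2_snd : ∀ (xs : List Int) (a b : Int), (last2 a b xs).2 = (b :: xs).getLastD 0 := by
  intro xs
  induction xs with
  | nil => intro a b; rfl
  | cons x xs ih =>
    intro a b
    rw [show last2 a b (x :: xs) = last2 b x xs from rfl, ih]
    simp

lemma last2_fst : ∀ (xs : List Int) (a b : Int),
    (last2 a b xs).1 = (a :: b :: xs).dropLast.getLastD 0 := by
  intro xs
  induction xs with
  | nil => intro a b; rfl
  | cons x xs ih =>
    intro a b
    rw [show last2 a b (x :: xs) = last2 b x xs from rfl, ih]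
    cases xs with
    | nil => rfl
    | cons y ys => simp [List.dropLast]

lemma getLastD_map_segVal : ∀ (l : List (List Char)),
    (l.map (segVal 0)).getLastD 0 = segVal 0 (l.getLastD []) := by
  intro l
  induction l with
  | nil => rfl
  | cons x xs ih =>
    cases xs with
    | nil => rfl
    | cons y ys => simpa using ih

lemma dropLast_map_segVal : ∀ (l : List (List Char)),
    (l.map (segVal 0)).dropLast = l.dropLast.map (segVal 0) := by
  intro l
  induction l with
  | nil => rfl
  | cons x xs ih =>
    cases xs with
    | nil => rfl
    | cons y ys => simpa using ih

lemma segVal_if_empty (seg : List Char) :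
    (if seg.isEmpty then 0 else segVal 0 seg) = segVal 0 seg := by
  cases seg <;> rfl

-- ===== VERDICT (by name: the statement is the Claim_ definition above) =====
theorem solve_captcha_spec : Claim_equal_solve_captcha := by
  unfold Claim_equal_solve_captcha
  intro text _
  unfold Spec_solve_captcha solve_captcha solve_captcha_alt
  rw [head_eq, loopA_spec]
  set F := ((text.toList.takeWhile (fun c => decide (c ≠ '=' ∧ c ≠ '?'))).filter
      (fun c => "0123456789+-".toList.contains c)) with hF
  set r := pySplitDash (F.map (fun c => if c = '+' then '-' else c)) with hr
  have hdig : (last2 0 (segVal 0 r.1) (r.2.map (segVal 0))).2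
      = (if ((r.1 :: r.2).getLastD []).isEmpty then 0
         else segVal 0 ((r.1 :: r.2).getLastD [])) := by
    rw [segVal_if_empty, last2_snd, show segVal 0 r.1 :: r.2.map (segVal 0)
        = (r.1 :: r.2).map (segVal 0) from rfl, getLastD_map_segVal]
  have hdig1 : (last2 0 (segVal 0 r.1) (r.2.map (segVal 0))).1
      = (if (r.1 :: r.2).length > 1 then
          (if ((r.1 :: r.2).dropLast.getLastD []).isEmpty then 0
           else segVal 0 ((r.1 :: r.2).dropLast.getLastD []))
         else 0) := by
    rw [segVal_if_empty, last2_fst]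
    cases hr2 : r.2 with
    | nil => rfl
    | cons q qs =>
      rw [if_pos (by simp)]
      rw [show ((0 : Int) :: segVal 0 r.1 :: (q :: qs).map (segVal 0)).dropLast
          = 0 :: (segVal 0 r.1 :: (q :: qs).map (segVal 0)).dropLast from rfl]
      rw [List.getLastD_cons]
      rw [show segVal 0 r.1 :: (q :: qs).map (segVal 0)
          = (r.1 :: q :: qs).map (segVal 0) from rfl]
      rw [dropLast_map_segVal, getLastD_map_segVal]
  show (if (if '+' ∈ F then (1 : Int) else 0) ≠ 0
        then (last2 0 (segVal 0 r.1) (r.2.map (segVal 0))).1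
             + (last2 0 (segVal 0 r.1) (r.2.map (segVal 0))).2
        else (last2 0 (segVal 0 r.1) (r.2.map (segVal 0))).1
             - (last2 0 (segVal 0 r.1) (r.2.map (segVal 0))).2)
      = (if '+' ∈ F
         then (if (r.1 :: r.2).length > 1 then
                 (if ((r.1 :: r.2).dropLast.getLastD []).isEmpty then 0
                  else segVal 0 ((r.1 :: r.2).dropLast.getLastD []))
               else 0)
              + (if ((r.1 :: r.2).getLastD []).isEmpty then 0
                 else segVal 0 ((r.1 :: r.2).getLastD []))
         else (if (r.1 :: r.2).length > 1 then
                 (if ((r.1 :: r.2).dropLast.getLastD []).isEmpty then 0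
                  else segVal 0 ((r.1 :: r.2).dropLast.getLastD []))
               else 0)
              - (if ((r.1 :: r.2).getLastD []).isEmpty then 0
                 else segVal 0 ((r.1 :: r.2).getLastD [])))
  by_cases hp : '+' ∈ F
  · rw [if_pos hp, if_pos hp, if_pos (show (1 : Int) ≠ 0 by norm_num), hdig, hdig1]
  · rw [if_neg hp, if_neg hp, if_neg (show ¬ (0 : Int) ≠ 0 by simp), hdig, hdig1]
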